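-- pv_equiv track=rewrite | github.com/abishgj/Algorithms | competitive_programming/non_neg_sorting.py | sort_non_negetive
-- ===== SOURCE A (Python) =====
-- def sort_non_negetive(array: list):
--     non_neg_array = [x for x in array if x >= 0]
--     non_neg_array.sort()
--     indexer = 0
--     for i in range(len(array)):
--         if array[i] >= 0:
--             array[i] = non_neg_array[indexer]
--             indexer += 1
--     return array
-- ===== SOURCE B (Python) =====
-- def sort_non_negetive(array: list):
--     # in-place selection sort restricted to the non-negative slots:
--     # negatives never move, and no auxiliary list is built
--     n = len(array)
--     for i in range(n):
--         if array[i] < 0: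
--             continue
--         m = i
--         for j in range(i + 1, n):
--             if array[j] >= 0 and array[j] < array[m]:
--                 m = j
--         array[i], array[m] = array[m], array[i]
--     return array
-- ===== Notes on version B (the rewrite author's own statement) =====
-- stated objective: alternative
-- what changed: Replaces A's extract-sort-write-back pipeline (build the list of non-negative values, library-sort it, copy it back with a running counter) by an in-place selection sort performed directly on the array: for each non-negative slot, scan the suffix for the minimal non-negative element and swap it in; no auxiliary list is built and negatives are never touched.
import Mathlib
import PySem

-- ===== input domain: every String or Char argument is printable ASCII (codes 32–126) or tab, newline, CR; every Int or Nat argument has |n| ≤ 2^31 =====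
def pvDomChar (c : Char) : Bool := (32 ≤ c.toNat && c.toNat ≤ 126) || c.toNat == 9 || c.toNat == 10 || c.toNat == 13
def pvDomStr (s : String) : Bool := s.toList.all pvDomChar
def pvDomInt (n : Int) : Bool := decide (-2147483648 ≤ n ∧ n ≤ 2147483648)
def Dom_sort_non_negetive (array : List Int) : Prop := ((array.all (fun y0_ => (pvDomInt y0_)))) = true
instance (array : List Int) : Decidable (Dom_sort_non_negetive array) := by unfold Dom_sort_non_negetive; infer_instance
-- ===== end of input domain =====

-- B replaces A's extract/sort/write-back pipeline by an in-place selection sort on the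
-- non-negative slots (no auxiliary list); same in-place mutation and return value; O(n^2) vs A's O(n log n).


-- ===== PORT A =====
-- A's write-back loop: walk the array left to right; at each non-negative entry consume
-- the next element of the sorted non-negative list (the running `indexer` of the Python
-- is the length of the consumed prefix, so the state here is the remaining suffix `nn`).
def sort_non_negetive_fill (xs : List Int) (nn : List Int) : List Int :=
  match xs with
  | [] => []
  | x :: t => if 0 ≤ x then nn.headD 0 :: sort_non_negetive_fill t nn.tail
              else x :: sort_non_negetive_fill t nn

def sort_non_negetive (array : List Int) : List Int :=
  sort_non_negetive_fill array (PySem.List.sorted (array.filter (fun x => decide (0 ≤ x))) id false)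

-- ===== PORT B =====
-- B's inner loop `for j in range(i+1, n): if array[j] >= 0 and array[j] < array[m]: m = j`
def snn_min (arr : List Int) (i n : Int) : Int :=
  (PySem.List.pyRange (i + 1) n 1).foldl
    (fun m j =>
      if 0 ≤ PySem.List.pyGetD arr j 0 ∧ PySem.List.pyGetD arr j 0 < PySem.List.pyGetD arr m 0
      then j else m) i

-- B's outer-loop body: skip a negative slot, else swap the minimal non-negative suffix element in
def snn_step (arr : List Int) (i n : Int) : List Int :=
  if PySem.List.pyGetD arr i 0 < 0 then arr
  else
    let m := snn_min arr i n
    let ai := PySem.List.pyGetD arr i 0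
    let am := PySem.List.pyGetD arr m 0
    PySem.List.pySetD (PySem.List.pySetD arr i am) m ai

def sort_non_negetive_alt (array : List Int) : List Int :=
  (PySem.List.pyRange 0 (PySem.List.len array) 1).foldl
    (fun arr i => snn_step arr i (PySem.List.len array)) array

-- ===== PRECONDITION & SPEC =====
def Spec_sort_non_negetive (array : List Int) (out : List Int) : Prop := out = sort_non_negetive_alt array
instance (array : List Int) (out : List Int) : Decidable (Spec_sort_non_negetive array out) := by unfold Spec_sort_non_negetive; infer_instance

-- ===== CLAIM (what is proved, stated in full; the proofs are below) =====
def Claim_equal_sort_non_negetive : Prop := ∀ (array : List Int), Dom_sort_non_negetive array → Spec_sort_non_negetive array (sort_non_negetive array)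

-- ===== LEMMAS AND PROOFS =====

-- `pvShape u v`: v has u's length, keeps u's negative entries unchanged, and is non-negative
-- wherever u is (the "negatives stay in place" shape both programs preserve)
def pvShape : List Int → List Int → Prop
  | [], [] => True
  | x :: u, y :: v => (x < 0 → y = x) ∧ (0 ≤ x → 0 ≤ y) ∧ pvShape u v
  | _, _ => False

theorem pvShape_refl (u : List Int) : pvShape u u := by
  induction u with
  | nil => trivial
  | cons x t ih => exact ⟨fun _ => rfl, fun h => h, ih⟩

theorem pvShape_drop : ∀ (k : Nat) (u v : List Int), pvShape u v → pvShape (u.drop k) (v.drop k) := by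
  intro k
  induction k with
  | zero => intro u v h; simpa using h
  | succ n ih =>
    intro u v h
    cases u with
    | nil => cases v with
      | nil => trivial
      | cons y w => exact absurd h (by simp [pvShape])
    | cons x t => cases v with
      | nil => exact absurd h (by simp [pvShape])
      | cons y w => simpa using ih t w h.2.2

theorem pvShape_set : ∀ (u v : List Int) (r : Nat) (w : Int), pvShape u v →
    0 ≤ v.getD r 0 → 0 ≤ w → pvShape u (v.set r w) := by
  intro u
  induction u with
  | nil => intro v r w h _ _; cases v with
    | nil => simpa using h
    | cons y t => exact absurd h (by simp [pvShape])
  | cons x t ih =>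
    intro v r w h hv hw
    cases v with
    | nil => exact absurd h (by simp [pvShape])
    | cons y s =>
      cases r with
      | zero =>
        refine ⟨fun hx => ?_, fun _ => by simpa using hw, by simpa using h.2.2⟩
        exact absurd (h.1 hx ▸ hx) (by simp at hv; omega)
      | succ n =>
        exact ⟨h.1, h.2.1, ih s n w h.2.2 (by simpa using hv) hw⟩

-- fill preserves length
theorem fill_length (xs : List Int) : ∀ nn, (sort_non_negetive_fill xs nn).length = xs.length := by
  induction xs with
  | nil => intro nn; rfl
  | cons x t ih =>
    intro nn
    by_cases hx : (0:Int) ≤ x <;> simp [sort_non_negetive_fill, hx, ih]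

-- fill with a non-negative stream preserves the shape
theorem fill_shape (xs : List Int) : ∀ nn, (∀ v ∈ nn, (0:Int) ≤ v) →
    pvShape xs (sort_non_negetive_fill xs nn) := by
  induction xs with
  | nil => intro nn _; trivial
  | cons x t ih =>
    intro nn hnn
    by_cases hx : (0:Int) ≤ x
    · simp only [sort_non_negetive_fill, if_pos hx]
      refine ⟨fun h => absurd hx (by omega), fun _ => ?_, ih nn.tail (fun v hv => hnn v (List.mem_of_mem_tail hv))⟩
      cases nn with
      | nil => simp
      | cons a s => exact hnn a (by simp)
    · simp only [sort_non_negetive_fill, if_neg hx]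
      exact ⟨fun _ => rfl, fun h => absurd h hx, ih nn hnn⟩

-- fill puts exactly the stream into the non-negative slots
theorem fill_filter (xs : List Int) : ∀ nn, (∀ v ∈ nn, (0:Int) ≤ v) →
    (xs.filter (fun x => decide (0 ≤ x))).length = nn.length →
    (sort_non_negetive_fill xs nn).filter (fun x => decide (0 ≤ x)) = nn := by
  induction xs with
  | nil =>
    intro nn _ hlen
    cases nn with
    | nil => rfl
    | cons a s => simp at hlen
  | cons x t ih =>
    intro nn hnn hlen
    by_cases hx : (0:Int) ≤ x
    · simp only [List.filter_cons, hx, decide_true, if_true] at hlen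
      cases nn with
      | nil => simp at hlen
      | cons a s =>
        have ha : (0:Int) ≤ a := hnn a (by simp)
        simp only [sort_non_negetive_fill, if_pos hx, List.headD, List.tail,
          List.filter_cons, ha, decide_true, if_true]
        simp only [List.length_cons] at hlen
        rw [ih s (fun v hv => hnn v (by simp [hv])) (by omega)]
    · simp only [List.filter_cons, hx, decide_false, Bool.false_eq_true, if_false] at hlen
      simp only [sort_non_negetive_fill, List.filter_cons, hx, decide_false,
        Bool.false_eq_true, if_false]
      exact ih nn hnn hlen

-- inner-loop invariant: the running m indexes the least non-negative entry seen so far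
theorem snn_min_fold (arr : List Int) (k : Nat) :
    ∀ (c tn mn : Nat), tn + c = arr.length → k < tn → k ≤ mn → mn < arr.length →
    (mn = k ∨ 0 ≤ arr.getD mn 0) →
    (∀ j : Nat, k ≤ j → j < tn → 0 ≤ arr.getD j 0 → arr.getD mn 0 ≤ arr.getD j 0) →
    arr.getD mn 0 ≤ arr.getD k 0 →
    ∃ rn : Nat,
      ((PySem.List.pyRange (tn : Int) (arr.length : Int) 1).foldl
        (fun m j =>
          if 0 ≤ PySem.List.pyGetD arr j 0 ∧ PySem.List.pyGetD arr j 0 < PySem.List.pyGetD arr m 0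
          then j else m) (mn : Int)) = (rn : Int) ∧
      k ≤ rn ∧ rn < arr.length ∧ (rn = k ∨ 0 ≤ arr.getD rn 0) ∧
      (∀ j : Nat, k ≤ j → j < arr.length → 0 ≤ arr.getD j 0 → arr.getD rn 0 ≤ arr.getD j 0) ∧
      arr.getD rn 0 ≤ arr.getD k 0 := by
  intro c
  induction c with
  | zero =>
    intro tn mn htc hkt hkm hml hsign hmin hmk
    have htn : tn = arr.length := by omega
    have hemp : PySem.List.pyRange (tn : Int) (arr.length : Int) 1 = [] := by
      rw [PySem.List.pyRange_one]
      simp [show ((arr.length : Int) - (tn : Int)).toNat = 0 by omega]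
    rw [hemp]
    exact ⟨mn, rfl, hkm, hml, hsign, fun j hj1 hj2 => hmin j hj1 (by omega), hmk⟩
  | succ c ih =>
    intro tn mn htc hkt hkm hml hsign hmin hmk
    have htl : tn < arr.length := by omega
    rw [PySem.List.pyRange_one_cons (by exact_mod_cast htl)]
    simp only [List.foldl_cons, PySem.List.pyGetD_natCast]
    by_cases hc : 0 ≤ arr.getD tn 0 ∧ arr.getD tn 0 < arr.getD mn 0
    · rw [if_pos hc]
      have : ((tn : Int) + 1) = ((tn + 1 : Nat) : Int) := by push_cast; ring
      rw [this]
      exact ih (tn + 1) tn (by omega) (by omega) (by omega) htl (Or.inr hc.1)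
        (fun j hj1 hj2 hj3 => by
          rcases Nat.lt_or_ge j tn with h | h
          · exact le_trans (le_of_lt hc.2) (hmin j hj1 h hj3)
          · have : j = tn := by omega
            simp [this])
        (le_trans (le_of_lt hc.2) hmk)
    · rw [if_neg hc]
      have : ((tn : Int) + 1) = ((tn + 1 : Nat) : Int) := by push_cast; ring
      rw [this]
      exact ih (tn + 1) mn (by omega) (by omega) hkm hml hsign
        (fun j hj1 hj2 hj3 => by
          rcases Nat.lt_or_ge j tn with h | h
          · exact hmin j hj1 h hj3
          · have hj : j = tn := by omega
            subst hj
            exact not_lt.mp (fun hlt => hc ⟨hj3, hlt⟩))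
        hmk

theorem snn_min_spec (arr : List Int) (k : Nat) (hk : k < arr.length) :
    ∃ mn : Nat, snn_min arr (k : Int) (arr.length : Int) = (mn : Int) ∧
      k ≤ mn ∧ mn < arr.length ∧ (mn = k ∨ 0 ≤ arr.getD mn 0) ∧
      (∀ j : Nat, k ≤ j → j < arr.length → 0 ≤ arr.getD j 0 → arr.getD mn 0 ≤ arr.getD j 0) ∧
      arr.getD mn 0 ≤ arr.getD k 0 := by
  have h := snn_min_fold arr k (arr.length - (k + 1)) (k + 1) k (by omega) (by omega) (le_refl k) hk
    (Or.inl rfl) (fun j hj1 hj2 hj3 => by rw [show j = k by omega]) (le_refl _)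
  unfold snn_min
  have hcast : ((k : Int) + 1) = ((k + 1 : Nat) : Int) := by push_cast; ring
  rw [hcast]
  exact h

-- the sorted non-negative stream A consumes is non-negative throughout
theorem pv_nn_nonneg (array : List Int) :
    ∀ v ∈ PySem.List.sorted (array.filter (fun x => decide (0 ≤ x))) id false, (0:Int) ≤ v := by
  intro v hv
  have := (PySem.List.mem_sorted _ _ _ v).1 hv
  simpa using List.of_mem_filter this

-- A's output holds exactly the sorted stream in its non-negative slots
theorem pv_filter_A (array : List Int) :
    (sort_non_negetive array).filter (fun x => decide (0 ≤ x)) =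
      PySem.List.sorted (array.filter (fun x => decide (0 ≤ x))) id false := by
  apply fill_filter array _ (pv_nn_nonneg array)
  rw [PySem.List.length_sorted]

theorem pv_sorted_A (array : List Int) :
    ((sort_non_negetive array).filter (fun x => decide (0 ≤ x))).Pairwise (· ≤ ·) := by
  rw [pv_filter_A]
  have := PySem.List.sorted_pairwise (array.filter (fun x => decide (0 ≤ x))) id
  simpa using this

-- the outer loop, from slot k on, turns any state related to A's output into A's output
theorem outer_inv (array : List Int) :
    ∀ (c k : Nat) (arr : List Int), k + c = array.length →
    arr.length = array.length →
    arr.take k = (sort_non_negetive array).take k →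
    ((arr.drop k).filter (fun x => decide (0 ≤ x))).Perm
      (((sort_non_negetive array).drop k).filter (fun x => decide (0 ≤ x))) →
    pvShape (array.drop k) (arr.drop k) →
    (PySem.List.pyRange ((k : Nat) : Int) ((array.length : Nat) : Int) 1).foldl
      (fun a i => snn_step a i ((array.length : Nat) : Int)) arr = sort_non_negetive array := by
  intro c
  induction c with
  | zero =>
    intro k arr hc hla htake _ _
    have hAlen : (sort_non_negetive array).length = array.length := fill_length array _
    have hemp : PySem.List.pyRange ((k:Nat):Int) ((array.length:Nat):Int) 1 = [] := by
      rw [PySem.List.pyRange_one]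
      simp [show (((array.length:Nat):Int) - ((k:Nat):Int)).toNat = 0 by omega]
    rw [hemp]
    calc arr = arr.take k := by rw [show k = arr.length by omega, List.take_length]
    _ = (sort_non_negetive array).take k := htake
    _ = sort_non_negetive array := by
        rw [show k = (sort_non_negetive array).length by omega, List.take_length]
  | succ c ih =>
    intro k arr hc hla htake hperm hs
    have hk : k < array.length := by omega
    have hkarr : k < arr.length := by omega
    have hAlen : (sort_non_negetive array).length = array.length := fill_length array _
    have hkA : k < (sort_non_negetive array).length := by omega
    have hshA : pvShape array (sort_non_negetive array) :=
      fill_shape array _ (pv_nn_nonneg array)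
    have dA := List.drop_eq_getElem_cons hkA
    have darr := List.drop_eq_getElem_cons hkarr
    have darray := List.drop_eq_getElem_cons hk
    rw [darray, darr] at hs
    obtain ⟨hneg_eq, hpos_imp, hs'⟩ := hs
    have hsA := pvShape_drop k array _ hshA
    rw [darray, dA] at hsA
    obtain ⟨hAneg, hApos, -⟩ := hsA
    rw [darr, dA] at hperm
    rw [PySem.List.pyRange_one_cons (by exact_mod_cast hk), List.foldl_cons]
    have hget : PySem.List.pyGetD arr ((k:Nat):Int) 0 = arr[k] := by
      rw [PySem.List.pyGetD_natCast, List.getD_eq_getElem arr 0 hkarr]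
    have hcast : (((k:Nat)):Int) + 1 = (((k+1 : Nat)):Int) := by push_cast; ring
    by_cases hneg : arr[k] < 0
    · -- negative slot: the step skips it, and A keeps it too
      have hstep : snn_step arr ((k:Nat):Int) ((array.length:Nat):Int) = arr := by
        unfold snn_step; rw [hget, if_pos hneg]
      rw [hstep, hcast]
      have harrayk : array[k] < 0 := by
        by_contra h
        exact absurd (hpos_imp (by omega)) (by omega)
      have hAk : (sort_non_negetive array)[k] = arr[k] := by
        rw [hAneg harrayk, hneg_eq harrayk]
      apply ih (k+1) arr (by omega) hla
      · rw [List.take_add_one, List.take_add_one, htake,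
          List.getElem?_eq_getElem hkarr, List.getElem?_eq_getElem hkA, hAk]
      · have eneg1 : (decide ((0:Int) ≤ arr[k])) = false := by simp; omega
        have eneg2 : (decide ((0:Int) ≤ (sort_non_negetive array)[k])) = false := by
          simp; omega
        rw [List.filter_cons, List.filter_cons, eneg1, eneg2,
          if_neg Bool.false_ne_true, if_neg Bool.false_ne_true] at hperm
        exact hperm
      · exact hs'
    · -- non-negative slot: swap the least non-negative suffix element into it
      have hposk : (0:Int) ≤ arr[k] := by omega
      have harrayk : (0:Int) ≤ array[k] := by
        by_contra h
        have := hneg_eq (by omega); omega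
      have hApos' : (0:Int) ≤ (sort_non_negetive array)[k] := hApos harrayk
      obtain ⟨mn, hmn_eq, hkm, hml, hsign, hmin, hmk⟩ := snn_min_spec arr k hkarr
      have hgmn : arr.getD mn 0 = arr[mn] := List.getD_eq_getElem arr 0 hml
      have hgk : arr.getD k 0 = arr[k] := List.getD_eq_getElem arr 0 hkarr
      have hstep : snn_step arr ((k:Nat):Int) ((array.length:Nat):Int) =
          (arr.set k arr[mn]).set mn arr[k] := by
        unfold snn_step
        rw [hget, if_neg (by omega)]
        have hlen2 : ((array.length:Nat):Int) = ((arr.length:Nat):Int) := by rw [hla]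
        rw [hlen2, hmn_eq]
        simp only [PySem.List.pySetD_natCast, PySem.List.pyGetD_natCast]
        rw [List.getD_eq_getElem arr 0 hml]
      have e1 : (decide ((0:Int) ≤ arr[k])) = true := by simpa using hposk
      have e2 : (decide ((0:Int) ≤ (sort_non_negetive array)[k])) = true := by
        simpa using hApos'
      have hP : ((arr[k] :: (arr.drop (k+1)).filter (fun x => decide (0 ≤ x)))).Perm
          ((sort_non_negetive array)[k] ::
            ((sort_non_negetive array).drop (k+1)).filter (fun x => decide (0 ≤ x))) := by
        rw [List.filter_cons, List.filter_cons, e1, e2, if_pos rfl, if_pos rfl] at hperm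
        exact hperm
      have hsorted2 : ((sort_non_negetive array)[k] ::
          ((sort_non_negetive array).drop (k+1)).filter (fun x => decide (0 ≤ x))).Pairwise
            (· ≤ ·) := by
        have hsub := List.Sublist.filter (fun x : Int => decide (0 ≤ x))
          (List.drop_sublist k (sort_non_negetive array))
        have := (pv_sorted_A array).sublist hsub
        rw [dA, List.filter_cons, e2, if_pos rfl] at this
        exact this
      have hmemA : (sort_non_negetive array)[k] ∈
          arr[k] :: (arr.drop (k+1)).filter (fun x => decide (0 ≤ x)) :=
        hP.symm.subset (by simp)
      have hle1 : arr[mn] ≤ (sort_non_negetive array)[k] := by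
        rcases List.mem_cons.mp hmemA with h | h
        · have := hmin k (le_refl k) hkarr (by rw [hgk]; omega)
          rw [hgmn, hgk] at this
          omega
        · have hmem : (sort_non_negetive array)[k] ∈ arr.drop (k+1) :=
            (List.mem_filter.mp h).1
          obtain ⟨r, hr, hrr⟩ := List.mem_iff_getElem.mp hmem
          have hrlen2 : k+1+r < arr.length := by
            simp [List.length_drop] at hr; omega
          have hidx : (arr.drop (k+1))[r] = arr[k+1+r] := List.getElem_drop
          have h0 : (0:Int) ≤ arr.getD (k+1+r) 0 := by
            rw [List.getD_eq_getElem arr 0 hrlen2, ← hidx, hrr]; exact hApos'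
          have := hmin (k+1+r) (by omega) hrlen2 h0
          rw [hgmn, List.getD_eq_getElem arr 0 hrlen2, ← hidx, hrr] at this
          exact this
      have hammem : arr[mn] ∈
          arr[k] :: (arr.drop (k+1)).filter (fun x => decide (0 ≤ x)) := by
        rcases Nat.eq_or_lt_of_le hkm with h | h
        · simp [← h]
        · have h0 : (0:Int) ≤ arr[mn] := by
            rcases hsign with h' | h'
            · omega
            · rw [hgmn] at h'; exact h'
          have hmem : arr[mn] ∈ arr.drop (k+1) := by
            refine List.mem_iff_getElem.mpr ⟨mn - (k+1), by simp [List.length_drop]; omega, ?_⟩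
            rw [List.getElem_drop]
            have : k + 1 + (mn - (k+1)) = mn := by omega
            simp [this]
          exact List.mem_cons_of_mem _ (List.mem_filter.mpr ⟨hmem, by simpa using h0⟩)
      have hge1 : (sort_non_negetive array)[k] ≤ arr[mn] := by
        rcases List.mem_cons.mp (hP.subset hammem) with h | h
        · omega
        · exact List.rel_of_pairwise_cons hsorted2 h
      have hamA : arr[mn] = (sort_non_negetive array)[k] := le_antisymm hle1 hge1
      rw [hstep, hcast]
      by_cases hmk' : mn = k
      · -- the minimum already sits in slot k: the swap is a no-op
        subst hmk'
        have harr2 : (arr.set mn arr[mn]).set mn arr[mn] = arr := by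
          rw [List.set_set, List.set_getElem_self]
        rw [harr2]
        apply ih (mn+1) arr (by omega) hla
        · rw [List.take_add_one, List.take_add_one, htake,
            List.getElem?_eq_getElem hkarr, List.getElem?_eq_getElem hkA, hamA]
        · rw [hamA] at hP
          exact hP.cons_inv
        · exact hs'
      · -- a genuine swap from position mn > k
        have hkmn : k < mn := by omega
        have harr'len : ((arr.set k arr[mn]).set mn arr[k]).length = arr.length := by simp
        have hdrop : ((arr.set k arr[mn]).set mn arr[k]).drop (k+1) =
            (arr.drop (k+1)).set (mn - (k+1)) arr[k] := by
          rw [List.drop_set, if_neg (by omega), List.drop_set, if_pos (by omega)]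
        have hrlen : mn - (k+1) < (arr.drop (k+1)).length := by
          simp [List.length_drop]; omega
        have ht1r : (arr.drop (k+1))[mn - (k+1)]'hrlen = arr[mn] := by
          rw [List.getElem_drop]
          have : k + 1 + (mn - (k+1)) = mn := by omega
          simp [this]
        have hsplit : arr.drop (k+1) =
            (arr.drop (k+1)).take (mn - (k+1)) ++
              arr[mn] :: (arr.drop (k+1)).drop (mn - (k+1) + 1) := by
          conv_lhs => rw [← List.take_append_drop (mn - (k+1)) (arr.drop (k+1))]
          rw [List.drop_eq_getElem_cons hrlen, ht1r]
        have hset : (arr.drop (k+1)).set (mn - (k+1)) arr[k] =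
            (arr.drop (k+1)).take (mn - (k+1)) ++
              arr[k] :: (arr.drop (k+1)).drop (mn - (k+1) + 1) := by
          rw [List.set_eq_take_append_cons_drop, if_pos hrlen]
        have e3 : (decide ((0:Int) ≤ arr[mn])) = true := by
          rw [hamA]; exact e2
        have hfil : (arr.drop (k+1)).filter (fun x => decide (0 ≤ x)) =
            ((arr.drop (k+1)).take (mn - (k+1))).filter (fun x => decide (0 ≤ x)) ++
              arr[mn] :: ((arr.drop (k+1)).drop (mn - (k+1) + 1)).filter
                (fun x => decide (0 ≤ x)) := by
          conv_lhs => rw [hsplit]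
          simp [List.filter_append, e3]
        apply ih (k+1) ((arr.set k arr[mn]).set mn arr[k]) (by omega) (by rw [harr'len, hla])
        · -- prefix agreement up to k+1
          rw [List.take_add_one, List.take_add_one]
          have h1 : ((arr.set k arr[mn]).set mn arr[k]).take k = arr.take k := by
            rw [List.take_set, List.take_set,
              List.set_eq_of_length_le (by simp only [List.length_set, List.length_take]; omega),
              List.set_eq_of_length_le (by simp only [List.length_take]; omega)]
          have h2 : ((arr.set k arr[mn]).set mn arr[k])[k]? = some arr[mn] := by
            rw [List.getElem?_eq_getElem (by rw [harr'len]; exact hkarr)]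
            rw [List.getElem_set, if_neg (by omega), List.getElem_set, if_pos rfl]
          rw [h1, htake, h2, List.getElem?_eq_getElem hkA, hamA]
        · -- suffix filters stay a permutation of A's
          rw [hdrop, hset]
          rw [hfil] at hP
          rw [← hamA] at hP
          have h1 : (arr[k] ::
              (((arr.drop (k+1)).take (mn - (k+1))).filter (fun x => decide (0 ≤ x)) ++
                arr[mn] :: ((arr.drop (k+1)).drop (mn - (k+1) + 1)).filter
                  (fun x => decide (0 ≤ x)))).Perm
              (arr[mn] :: arr[k] ::
                (((arr.drop (k+1)).take (mn - (k+1))).filter (fun x => decide (0 ≤ x)) ++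
                  ((arr.drop (k+1)).drop (mn - (k+1) + 1)).filter
                    (fun x => decide (0 ≤ x)))) :=
            (List.Perm.cons _ List.perm_middle).trans (List.Perm.swap _ _ _)
          have h2 := (h1.symm.trans hP).cons_inv
          have hgoalfil : ((arr.drop (k+1)).take (mn - (k+1)) ++
              arr[k] :: (arr.drop (k+1)).drop (mn - (k+1) + 1)).filter
                (fun x => decide (0 ≤ x)) =
              ((arr.drop (k+1)).take (mn - (k+1))).filter (fun x => decide (0 ≤ x)) ++
                arr[k] :: ((arr.drop (k+1)).drop (mn - (k+1) + 1)).filter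
                  (fun x => decide (0 ≤ x)) := by
            simp [List.filter_append, e1]
          rw [hgoalfil]
          exact List.perm_middle.trans h2
        · -- shape is preserved: both swapped slots are non-negative
          rw [hdrop]
          apply pvShape_set _ _ _ _ hs'
          · rw [List.getD_eq_getElem _ 0 hrlen, ht1r, hamA]; exact hApos'
          · exact hposk

-- ===== VERDICT (by name: the statement is the Claim_ definition above) =====
theorem sort_non_negetive_spec : Claim_equal_sort_non_negetive := by
  intro array _
  unfold Spec_sort_non_negetive sort_non_negetive_alt
  have h := outer_inv array array.length 0 array (by omega) rfl (by simp)
    (by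
      simp only [List.drop_zero]
      rw [pv_filter_A]
      exact (PySem.List.sorted_perm _ _ _).symm)
    (by simpa using pvShape_refl array)
  simpa [PySem.List.len_eq] using h.symm
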